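-- pv_equiv track=rewrite | github.com/NikolayWalters/codeChallenges | stringPermutation.py | permutationCheck
-- ===== SOURCE A (Python) =====
-- def createDict(string):
-- 	stringDict = {}
-- 	for char in string:
-- 		if char in stringDict:
-- 			stringDict[char]+=1
-- 		else:
-- 			stringDict[char] = 1
-- 	return stringDict
--
-- def permutationCheck(string1, string2):
-- 	"""
-- 	Initial attempt using dictionaries
-- 	"""
--
-- 	stringDict1 = createDict(string1)
-- 	stringDict2 = createDict(string2)
-- 	for key in stringDict2:
-- 		try:
-- 			diff = stringDict1[key]-stringDict2[key]
-- 		except: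
-- 			return False
-- 		if diff < 0:
-- 			return False
-- 	return True
-- ===== SOURCE B (Python) =====
-- def permutationCheck(string1, string2):
--     """Single decrementing scan: build the requirement table from string2,
--     consume it while scanning string1, succeed iff nothing is left over."""
--     need = {}
--     for ch in string2:
--         need[ch] = need.get(ch, 0) + 1
--     for ch in string1:
--         if ch in need and need[ch] > 0:
--             need[ch] -= 1
--     return all(v <= 0 for v in need.values())
-- ===== Notes on version B (the rewrite author's own statement) =====
-- stated objective: alternative
-- what changed: Instead of building two frequency dicts and comparing them key-by-key with a try/except lookup, B builds one requirement table from string2 and consumes it in a single decrementing scan over string1, returning True iff every requirement was consumed.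
import Mathlib
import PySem

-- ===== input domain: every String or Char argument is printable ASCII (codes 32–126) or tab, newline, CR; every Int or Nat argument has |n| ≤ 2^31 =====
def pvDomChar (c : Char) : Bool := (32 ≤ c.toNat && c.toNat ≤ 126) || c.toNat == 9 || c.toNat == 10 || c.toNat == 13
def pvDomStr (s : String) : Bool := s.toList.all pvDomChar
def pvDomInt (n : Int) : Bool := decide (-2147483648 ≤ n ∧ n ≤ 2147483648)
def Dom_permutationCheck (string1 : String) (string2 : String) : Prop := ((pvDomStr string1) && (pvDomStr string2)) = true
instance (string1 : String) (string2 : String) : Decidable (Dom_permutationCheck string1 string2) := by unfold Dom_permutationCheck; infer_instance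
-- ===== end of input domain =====

-- B replaces A's two frequency dicts compared key-by-key with one requirement
-- table consumed by a single decrementing scan over string1 (objective: alternative).

-- ===== PORT A =====
-- createDict: per-char frequency dict, branching on membership as the Python does
def createDict (s : String) : PySem.Dict Char Int :=
  s.toList.foldl
    (fun d c =>
      if d.contains c then d.insert c (d.getD c 0 + 1)
      else d.insert c 1)
    PySem.Dict.empty

-- the 'for key in stringDict2' loop with its early returns (try/except → get?)
def permLoopA (d1 d2 : PySem.Dict Char Int) : List Char → Bool
  | [] => true
  | k :: rest =>
    match d1.get? k with
    | none => false
    | some v1 => if v1 - d2.getD k 0 < 0 then false else permLoopA d1 d2 rest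

def permutationCheck (string1 : String) (string2 : String) : Bool :=
  let stringDict1 := createDict string1
  let stringDict2 := createDict string2
  permLoopA stringDict1 stringDict2 stringDict2.keys

-- ===== PORT B =====
-- the body of B's decrementing loop over string1
def decStep (d : PySem.Dict Char Int) (c : Char) : PySem.Dict Char Int :=
  if d.contains c && decide (0 < d.getD c 0) then d.insert c (d.getD c 0 - 1) else d

def permutationCheck_alt (string1 : String) (string2 : String) : Bool :=
  let need := string2.toList.foldl
    (fun d c => d.insert c (d.getD c 0 + 1)) PySem.Dict.empty
  let need := string1.toList.foldl decStep need
  need.values.all (fun v => decide (v ≤ 0))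

-- ===== PRECONDITION & SPEC =====
def Spec_permutationCheck (string1 : String) (string2 : String) (out : Bool) : Prop := out = permutationCheck_alt string1 string2
instance (string1 : String) (string2 : String) (out : Bool) : Decidable (Spec_permutationCheck string1 string2 out) := by unfold Spec_permutationCheck; infer_instance

-- ===== CLAIM (what is proved, stated in full; the proofs are below) =====
def Claim_equal_permutationCheck : Prop := ∀ (string1 : String) (string2 : String), Dom_permutationCheck string1 string2 → Spec_permutationCheck string1 string2 (permutationCheck string1 string2)

-- ===== LEMMAS AND PROOFS =====

-- A's createDict builds exactly Counter(s): the two fold steps agree on every dict.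
theorem createDict_eq_counter (s : String) : createDict s = PySem.Dict.counter s.toList := by
  rw [← PySem.Dict.foldl_insert_getD_add_one_eq_counter]
  unfold createDict
  congr 1
  funext d c
  by_cases h : d.contains c
  · simp [h]
  · simp [h, PySem.Dict.getD_of_not_contains d 0 (by simpa using h)]

theorem contains_insert_of_ne {κ ν : Type} [BEq κ] [LawfulBEq κ]
    (d : PySem.Dict κ ν) {k c : κ} (v : ν) (h : c ≠ k) :
    (d.insert c v).contains k = d.contains k := by
  rw [PySem.Dict.contains_eq_isSome_get?, PySem.Dict.contains_eq_isSome_get?,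
    PySem.Dict.get?_insert_of_ne _ _ (Ne.symm h)]

theorem get?_eq_some_getD {κ ν : Type} [BEq κ] [LawfulBEq κ]
    (d : PySem.Dict κ ν) (k : κ) (v : ν) (h : d.contains k = true) :
    d.get? k = some (d.getD k v) := by
  rw [PySem.Dict.contains_eq_isSome_get?] at h
  cases hg : d.get? k with
  | none => simp [hg] at h
  | some w => simp [PySem.Dict.getD, hg]

theorem decStep_contains (d : PySem.Dict Char Int) (c k : Char) :
    (decStep d c).contains k = d.contains k := by
  unfold decStep
  split_ifs with h
  · by_cases hck : c = k
    · subst hck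
      simp [PySem.Dict.contains_insert_self, (Bool.and_eq_true ..).mp h |>.1]
    · exact contains_insert_of_ne d _ hck
  · rfl

theorem decStep_keys (d : PySem.Dict Char Int) (c : Char) :
    (decStep d c).keys = d.keys := by
  unfold decStep
  split_ifs with h
  · exact PySem.Dict.keys_insert_of_contains d _ ((Bool.and_eq_true ..).mp h).1
  · rfl

theorem decFold_keys (l : List Char) (d : PySem.Dict Char Int) :
    (l.foldl decStep d).keys = d.keys := by
  induction l generalizing d with
  | nil => rfl
  | cons c t ih => simp [List.foldl_cons, ih, decStep_keys]

-- value after the decrementing scan: monus of the count of k in the scanned list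
theorem decFold_getD (l : List Char) (d : PySem.Dict Char Int) (k : Char)
    (hk : d.contains k = true) (hv : 0 ≤ d.getD k 0) :
    (l.foldl decStep d).getD k 0 = max (d.getD k 0 - l.count k) 0 := by
  induction l generalizing d with
  | nil => simp [List.count_nil]; omega
  | cons c t ih =>
    rw [List.foldl_cons]
    by_cases hck : c = k
    · subst hck
      by_cases hpos : 0 < d.getD c 0
      · have hstep : decStep d c = d.insert c (d.getD c 0 - 1) := by
          simp [decStep, hk, hpos]
        rw [hstep, ih _ (by simp [PySem.Dict.contains_insert_self])
              (by rw [PySem.Dict.getD_insert_self]; omega)]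
        rw [PySem.Dict.getD_insert_self]
        simp
        omega
      · have hstep : decStep d c = d := by simp [decStep, hpos]
        rw [hstep, ih d hk hv]
        simp
        omega
    · have hne : ¬ (c == k) = true := by simpa using hck
      have hgd : (decStep d c).getD k 0 = d.getD k 0 := by
        unfold decStep
        split_ifs with h
        · exact PySem.Dict.getD_insert_of_ne _ _ _ (Ne.symm hck)
        · rfl
      rw [ih _ (by rw [decStep_contains]; exact hk) (by rw [hgd]; exact hv), hgd]
      simp [List.count_cons, hne]

-- A's key loop returns true iff every key passes the lookup-and-compare test
theorem permLoopA_eq_all (d1 d2 : PySem.Dict Char Int) (l : List Char) :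
    permLoopA d1 d2 l =
      l.all (fun k => d1.contains k && decide (0 ≤ d1.getD k 0 - d2.getD k 0)) := by
  induction l with
  | nil => rfl
  | cons k rest ih =>
    rw [List.all_cons, ← ih]
    by_cases hc : d1.contains k = true
    · rw [show permLoopA d1 d2 (k :: rest) =
          match d1.get? k with
          | none => false
          | some v1 => if v1 - d2.getD k 0 < 0 then false else permLoopA d1 d2 rest from rfl,
        get?_eq_some_getD d1 k 0 hc]
      simp only [hc, Bool.true_and]
      by_cases hlt : d1.getD k 0 - d2.getD k 0 < 0
      · rw [if_pos hlt,
          show decide (0 ≤ d1.getD k 0 - d2.getD k 0) = false by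
            simp only [decide_eq_false_iff_not]; omega]
        simp
      · rw [if_neg hlt,
          show decide (0 ≤ d1.getD k 0 - d2.getD k 0) = true by
            simp only [decide_eq_true_eq]; omega]
        simp
    · have hn : d1.get? k = none := by
        rw [PySem.Dict.contains_eq_isSome_get?] at hc
        cases h : d1.get? k <;> simp [h] at hc ⊢
      rw [show permLoopA d1 d2 (k :: rest) =
          match d1.get? k with
          | none => false
          | some v1 => if v1 - d2.getD k 0 < 0 then false else permLoopA d1 d2 rest from rfl, hn]
      simp [hc]

-- main bridge: both programs decide ∀ k ∈ s2, count_{s2}(k) ≤ count_{s1}(k)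
theorem permutationCheck_eq_alt (s1 s2 : String) :
    permutationCheck s1 s2 = permutationCheck_alt s1 s2 := by
  simp only [permutationCheck, permutationCheck_alt]
  rw [createDict_eq_counter, createDict_eq_counter,
    PySem.Dict.foldl_insert_getD_add_one_eq_counter]
  rw [permLoopA_eq_all]
  have hvals : (s1.toList.foldl decStep (PySem.Dict.counter s2.toList)).values
      = (s1.toList.foldl decStep (PySem.Dict.counter s2.toList)).keys.map
          (fun k => (s1.toList.foldl decStep (PySem.Dict.counter s2.toList)).getD k 0) := by
    exact PySem.Dict.values_eq_map_keys _
      (by rw [decFold_keys]; exact PySem.Dict.nodup_keys_counter s2.toList) 0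
  rw [hvals, List.all_map, decFold_keys, Bool.eq_iff_iff,
    List.all_eq_true, List.all_eq_true]
  refine forall_congr' fun k => imp_congr_right fun hk => ?_
  have hk2 : k ∈ s2.toList := by
    have := (PySem.Dict.keys_counter s2.toList) ▸ hk
    simpa [PySem.Set.mem_ofList] using this
  have hcnt2 : 0 < s2.toList.count k := List.count_pos_iff.mpr hk2
  rw [Function.comp_apply,
    decFold_getD _ _ _ (by rw [PySem.Dict.contains_counter]; simpa using hk2)
      (by rw [PySem.Dict.getD_counter]; positivity),
    PySem.Dict.getD_counter, PySem.Dict.getD_counter,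
    PySem.Dict.contains_counter]
  by_cases hle : (s2.toList.count k : Int) ≤ s1.toList.count k
  · have h1 : k ∈ s1.toList := by
      rw [← List.count_pos_iff]
      omega
    simp [h1]
  · by_cases h1 : k ∈ s1.toList
    · simp [h1]
    · have hz : s1.toList.count k = 0 := List.count_eq_zero.mpr h1
      simp [h1, hz]
      omega

-- ===== VERDICT (by name: the statement is the Claim_ definition above) =====
theorem permutationCheck_spec : Claim_equal_permutationCheck := by
  intro s1 s2 _
  unfold Spec_permutationCheck
  exact permutationCheck_eq_alt s1 s2
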